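-- pv_equiv track=rewrite | github.com/alejosecco/1er_cuatrimestre | clase_6/funciones.py | calcular_area_rect
-- ===== SOURCE A (Python) =====
-- def calcular_area_rect(dimensiones:tuple):
--     flag = True
--     area = 0
--     perimetro = 0
--     for dato in dimensiones:
--         if flag == True:
--             area += dato
--             flag = False
--         else:
--             area = area * dato
--         perimetro += dato *2
--     mensaje = f"area: {area:} perimetro: {perimetro}"
--     return mensaje
-- ===== SOURCE B (Python) =====
-- def calcular_area_rect(dimensiones: tuple):
--     perimetro = 2 * sum(dimensiones)
--     if dimensiones:
--         area = 1
--         for d in reversed(dimensiones):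
--             area *= d
--     else:
--         area = 0
--     return f"area: {area} perimetro: {perimetro}"
-- ===== Notes on version B (the rewrite author's own statement) =====
-- stated objective: simpler
-- what changed: Replaces A's single flag-toggled interleaved loop by two independent aggregates: perimetro = 2*sum(dimensiones) and a back-to-front product pass (area 0 on the empty tuple, as A returns), then the same f-string.
import Mathlib
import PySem

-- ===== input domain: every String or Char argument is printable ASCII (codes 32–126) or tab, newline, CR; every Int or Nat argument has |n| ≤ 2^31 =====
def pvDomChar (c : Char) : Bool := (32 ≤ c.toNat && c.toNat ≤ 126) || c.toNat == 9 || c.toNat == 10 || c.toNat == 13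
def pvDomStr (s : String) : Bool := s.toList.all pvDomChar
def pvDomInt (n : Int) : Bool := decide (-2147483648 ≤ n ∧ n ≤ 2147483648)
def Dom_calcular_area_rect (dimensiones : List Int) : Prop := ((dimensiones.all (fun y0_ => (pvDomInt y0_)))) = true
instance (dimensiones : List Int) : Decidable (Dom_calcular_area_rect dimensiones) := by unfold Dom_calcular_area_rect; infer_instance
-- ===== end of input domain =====

-- B computes the two aggregates independently (recursive product, 2 * sum) instead of A's
-- single flag-toggled accumulating loop; objective: simpler. Same return value everywhere.

-- ===== PORT A =====
def calcular_area_rect (dimensiones : List Int) : String :=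
  let st := dimensiones.foldl
    (fun (st : Bool × Int × Int) dato =>
      let flag := st.1; let area := st.2.1; let perimetro := st.2.2
      if flag = true then (false, area + dato, perimetro + dato * 2)
      else (flag, area * dato, perimetro + dato * 2))
    (true, 0, 0)
  "area: " ++ PySem.Int.toStr st.2.1 ++ " perimetro: " ++ PySem.Int.toStr st.2.2

-- ===== PORT B =====
def calcular_area_rect_alt (dimensiones : List Int) : String :=
  let perimetro := 2 * dimensiones.sum
  let area := if dimensiones ≠ [] then dimensiones.reverse.foldl (fun a d => a * d) 1 else 0
  "area: " ++ PySem.Int.toStr area ++ " perimetro: " ++ PySem.Int.toStr perimetro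

-- ===== PRECONDITION & SPEC =====
def Spec_calcular_area_rect (dimensiones : List Int) (out : String) : Prop := out = calcular_area_rect_alt dimensiones
instance (dimensiones : List Int) (out : String) : Decidable (Spec_calcular_area_rect dimensiones out) := by unfold Spec_calcular_area_rect; infer_instance

-- ===== CLAIM (what is proved, stated in full; the proofs are below) =====
def Claim_equal_calcular_area_rect : Prop := ∀ (dimensiones : List Int), Dom_calcular_area_rect dimensiones → Spec_calcular_area_rect dimensiones (calcular_area_rect dimensiones)

-- ===== LEMMAS AND PROOFS =====

-- After the first element, A's flag is false; from then on the loop multiplies into area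
-- and keeps adding 2·dato to perimetro.
theorem pvFoldFalse (l : List Int) (a p : Int) :
    l.foldl
      (fun (st : Bool × Int × Int) dato =>
        let flag := st.1; let area := st.2.1; let perimetro := st.2.2
        if flag = true then (false, area + dato, perimetro + dato * 2)
        else (flag, area * dato, perimetro + dato * 2))
      (false, a, p) = (false, a * l.prod, p + 2 * l.sum) := by
  induction l generalizing a p with
  | nil => simp
  | cons d ts ih =>
    simp only [List.foldl_cons, List.prod_cons, List.sum_cons]
    rw [if_neg (by simp), ih]
    simp only [Prod.mk.injEq]
    exact ⟨trivial, by ring, by ring⟩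

-- foldl of multiplication from a equals a * product.
theorem pvFoldlMul (l : List Int) (a : Int) :
    l.foldl (fun a d => a * d) a = a * l.prod := by
  induction l generalizing a with
  | nil => simp
  | cons d ts ih => simp only [List.foldl_cons, List.prod_cons, ih]; ring

theorem calcular_area_rect_eq (l : List Int) :
    calcular_area_rect l = calcular_area_rect_alt l := by
  cases l with
  | nil => rfl
  | cons d ts =>
    unfold calcular_area_rect calcular_area_rect_alt
    simp only [List.foldl_cons, pvFoldFalse, List.sum_cons, ne_eq, reduceCtorEq,
      not_false_eq_true, if_true, pvFoldlMul, one_mul, List.prod_reverse, List.prod_cons]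
    have e1 : ((0 : Int) + d) * ts.prod = d * ts.prod := by ring
    have e2 : (0 : Int) + d * 2 + 2 * ts.sum = 2 * (d + ts.sum) := by ring
    rw [e1, e2]

-- ===== VERDICT (by name: the statement is the Claim_ definition above) =====
theorem calcular_area_rect_spec : Claim_equal_calcular_area_rect := by
  intro l _
  exact calcular_area_rect_eq l
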